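-- pv_equiv track=rewrite | github.com/DEsalasL/lopit_analyst | bin/dataset_prep.py | create_combinations
-- ===== SOURCE A (Python) =====
-- from itertools import combinations
--
-- def create_combinations(experiments_list):
--     ranges = [key + 1 for key in range(1, len(experiments_list) + 1)]
--     tmp_set = [list(combinations(experiments_list, g)) for g in ranges]
--     datasets = []
--     for lista in tmp_set:
--         for tupla in lista:
--             datasets.append(list(tupla))
--     return datasets
-- ===== SOURCE B (Python) =====
-- def create_combinations(experiments_list):
--     n = len(experiments_list)
--     datasets = []
--
--     def rec(start, r, prefix):
--         if r == 0:
--             datasets.append(prefix)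
--             return
--         for i in range(start, n):
--             rec(i + 1, r - 1, prefix + [experiments_list[i]])
--
--     for g in range(2, n + 1):
--         rec(0, g, [])
--     return datasets
-- ===== Notes on version B (the rewrite author's own statement) =====
-- stated objective: alternative
-- what changed: Replaces itertools.combinations plus a flattening double loop by an explicit recursive backtracking generator (advance a start index, recurse with r-1, collect when r hits 0) that appends each combination directly.
import Mathlib
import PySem

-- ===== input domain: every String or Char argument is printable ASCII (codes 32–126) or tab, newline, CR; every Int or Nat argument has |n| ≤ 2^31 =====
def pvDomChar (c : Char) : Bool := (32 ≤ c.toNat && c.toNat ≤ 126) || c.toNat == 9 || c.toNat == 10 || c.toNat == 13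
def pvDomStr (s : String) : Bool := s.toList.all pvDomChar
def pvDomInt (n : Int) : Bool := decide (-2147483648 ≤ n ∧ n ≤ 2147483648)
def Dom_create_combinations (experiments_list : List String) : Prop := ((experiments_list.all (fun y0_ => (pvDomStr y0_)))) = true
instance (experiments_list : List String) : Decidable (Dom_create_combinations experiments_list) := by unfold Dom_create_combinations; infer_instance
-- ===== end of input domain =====

-- B replaces itertools.combinations + a flattening double loop by an explicit
-- recursive backtracking generator (alternative decomposition, same cost).

-- ===== PORT A =====
-- itertools.combinations(xs, g) in lexicographic order (library call, ported as
-- the standard recursion producing exactly itertools' output order; A only calls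
-- it with g ≥ 0, passed here as a Nat).
def pyCombinations (xs : List String) (g : Nat) : List (List String) :=
  match g, xs with
  | 0, _ => [[]]
  | _ + 1, [] => []
  | g + 1, x :: t => (pyCombinations t g).map (fun ys => x :: ys) ++ pyCombinations t (g + 1)

def create_combinations (experiments_list : List String) : List (List String) :=
  let ranges := (PySem.List.pyRange 1 ((experiments_list.length : Int) + 1) 1).map (fun key => key + 1)
  let tmp_set := ranges.map (fun g => pyCombinations experiments_list g.toNat)
  let datasets := tmp_set.foldl (fun acc lista => lista.foldl (fun acc tupla => acc ++ [tupla]) acc) []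
  datasets

-- ===== PORT B =====
-- rec(start, r, prefix): the Python iterates i from start over the remaining
-- elements; here the suffix experiments_list[start:] is carried as a list.
def combRec (xs : List String) (r : Nat) (pref : List String) : List (List String) :=
  match r, xs with
  | 0, _ => [pref]
  | _ + 1, [] => []
  | r + 1, x :: t => combRec t r (pref ++ [x]) ++ combRec t (r + 1) pref

def create_combinations_alt (experiments_list : List String) : List (List String) :=
  (PySem.List.pyRange 2 ((experiments_list.length : Int) + 1) 1).foldl
    (fun datasets g => datasets ++ combRec experiments_list g.toNat []) []

-- ===== PRECONDITION & SPEC =====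
def Spec_create_combinations (experiments_list : List String) (out : List (List String)) : Prop := out = create_combinations_alt experiments_list
instance (experiments_list : List String) (out : List (List String)) : Decidable (Spec_create_combinations experiments_list out) := by unfold Spec_create_combinations; infer_instance

-- ===== CLAIM (what is proved, stated in full; the proofs are below) =====
def Claim_equal_create_combinations : Prop := ∀ (experiments_list : List String), Dom_create_combinations experiments_list → Spec_create_combinations experiments_list (create_combinations experiments_list)

-- ===== LEMMAS AND PROOFS =====

-- B's recursion produces the same combinations as itertools, each prefixed.
theorem combRec_eq_map (xs : List String) (r : Nat) (pref : List String) :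
    combRec xs r pref = (pyCombinations xs r).map (fun ys => pref ++ ys) := by
  induction xs generalizing r pref with
  | nil => cases r <;> simp [combRec, pyCombinations]
  | cons x t ih =>
    cases r with
    | zero => simp [combRec, pyCombinations]
    | succ r => simp [combRec, pyCombinations, ih]

theorem pyCombinations_eq_nil (xs : List String) (g : Nat) (h : xs.length < g) :
    pyCombinations xs g = [] := by
  induction xs generalizing g with
  | nil => cases g with
    | zero => omega
    | succ g => simp [pyCombinations]
  | cons x t ih =>
    cases g with
    | zero => omega
    | succ g =>
      simp only [pyCombinations]
      rw [ih g (by simpa using h), ih (g + 1) (by simp at h; omega)]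
      simp

theorem foldl_snoc_eq_append (l acc : List (List String)) :
    l.foldl (fun a t => a ++ [t]) acc = acc ++ l := by
  induction l generalizing acc with
  | nil => simp
  | cons x t ih => simp [ih]

theorem foldl_flatten (ls : List (List (List String))) (acc : List (List String)) :
    ls.foldl (fun a l => l.foldl (fun a t => a ++ [t]) a) acc = acc ++ ls.flatten := by
  induction ls generalizing acc with
  | nil => simp
  | cons l ls ih => rw [List.foldl_cons, foldl_snoc_eq_append, ih]; simp

theorem foldl_append_flatten (ls : List Int) (f : Int → List (List String)) (acc : List (List String)) :
    ls.foldl (fun a g => a ++ f g) acc = acc ++ (ls.map f).flatten := by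
  induction ls generalizing acc with
  | nil => simp
  | cons g gs ih => simp [ih]

-- ===== VERDICT (by name: the statement is the Claim_ definition above) =====
theorem create_combinations_spec : Claim_equal_create_combinations := by
  intro xs _
  unfold Spec_create_combinations create_combinations create_combinations_alt
  simp only [foldl_flatten, foldl_append_flatten, List.nil_append, List.map_map]
  rw [PySem.List.pyRange_one, PySem.List.pyRange_one]
  obtain ⟨n, hn⟩ : ∃ n, n = xs.length := ⟨xs.length, rfl⟩
  rw [← hn]
  have h1 : ((n : Int) + 1 - 1).toNat = n := by omega
  have h2 : ((n : Int) + 1 - 2).toNat = n - 1 := by omega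
  rw [h1, h2]
  rw [List.map_map, List.map_map]
  have hA : (List.range n).map (((fun g => pyCombinations xs g.toNat) ∘ fun key => key + 1) ∘ fun k : Nat => 1 + (k : Int))
      = (List.range n).map (fun k => pyCombinations xs (k + 2)) := by
    apply List.map_congr_left
    intro k _
    simp only [Function.comp_apply]
    congr 1
    omega
  have hB : (List.range (n - 1)).map ((fun g => combRec xs g.toNat []) ∘ fun k : Nat => 2 + (k : Int))
      = (List.range (n - 1)).map (fun k => pyCombinations xs (k + 2)) := by
    apply List.map_congr_left
    intro k _
    simp only [Function.comp_apply]
    rw [combRec_eq_map]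
    have hk : ((2 : Int) + k).toNat = k + 2 := by omega
    rw [hk]
    simp
  rw [hA, hB]
  cases n with
  | zero => simp
  | succ m =>
    have : m + 1 - 1 = m := rfl
    rw [this, List.range_succ, List.map_append, List.flatten_append]
    have : pyCombinations xs (m + 2) = [] := by
      apply pyCombinations_eq_nil
      omega
    simp [this]
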